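-- pv_equiv track=rewrite | github.com/kwyjad/Pythia | scripts/ci/summarize_connectors.py | deduplicate_entries
-- ===== SOURCE A (Python) =====
-- from typing import Any, Dict, Iterable, List, Mapping, Sequence, Tuple
--
-- def deduplicate_entries(
--     entries: Sequence[Mapping[str, Any]]
-- ) -> Tuple[List[Dict[str, Any]], Dict[str, int]]:
--     grouped: Dict[Tuple[str, str], List[Tuple[int, Dict[str, Any]]]] = {}
--     for index, entry in enumerate(entries):
--         connector_id = str(entry.get("connector_id") or "unknown")
--         mode = str(entry.get("mode") or "real")
--         key = (connector_id, mode)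
--         grouped.setdefault(key, []).append((index, dict(entry)))
--
--     deduped: List[Tuple[int, Dict[str, Any]]] = []
--     duplicates: Dict[str, int] = {}
--     for key, records in grouped.items():
--         if len(records) == 1:
--             deduped.append(records[0])
--             continue
--         records.sort(key=lambda item: ((item[1].get("started_at_utc") or ""), item[0]))
--         chosen = records[-1]
--         deduped.append(chosen)
--         connector_id, _mode = key
--         duplicates[connector_id] = duplicates.get(connector_id, 0) + len(records) - 1
--
--     deduped.sort(key=lambda item: item[0])
--     return [entry for _, entry in deduped], duplicates
-- ===== SOURCE B (Python) =====
-- def _update(cur, index, ts, record):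
--     # merge one entry into the running (count, index, ts, record) state of its key
--     if cur is None:
--         return (1, index, ts, record)
--     count, best_index, best_ts, best_record = cur
--     if best_ts <= ts:
--         return (count + 1, index, ts, record)
--     return (count + 1, best_index, best_ts, best_record)
--
--
-- def deduplicate_entries(entries):
--     best = {}  # (connector_id, mode) -> (count, index, started_at, record)
--     for index, entry in enumerate(entries):
--         connector_id = str(entry.get("connector_id") or "unknown")
--         mode = str(entry.get("mode") or "real")
--         ts = str(entry.get("started_at_utc") or "")
--         key = (connector_id, mode)
--         best[key] = _update(best.get(key), index, ts, dict(entry))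
--     duplicates = {}
--     chosen = []
--     for (connector_id, _mode), (count, index, _ts, record) in best.items():
--         if count > 1:
--             duplicates[connector_id] = duplicates.get(connector_id, 0) + count - 1
--         chosen.append((index, record))
--     chosen.sort(key=lambda item: item[0])
--     return [record for _, record in chosen], duplicates
-- ===== Notes on version B (the rewrite author's own statement) =====
-- stated objective: alternative
-- what changed: B replaces A's group-into-lists / per-group sort / pick-last pipeline by a single streaming pass that keeps, per (connector_id, mode) key, only a running count and the current best record (replaced when a new entry's timestamp is >= the best's, which reproduces the later-index-wins tie-break), so no per-group list is ever built or sorted.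
import Mathlib
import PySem

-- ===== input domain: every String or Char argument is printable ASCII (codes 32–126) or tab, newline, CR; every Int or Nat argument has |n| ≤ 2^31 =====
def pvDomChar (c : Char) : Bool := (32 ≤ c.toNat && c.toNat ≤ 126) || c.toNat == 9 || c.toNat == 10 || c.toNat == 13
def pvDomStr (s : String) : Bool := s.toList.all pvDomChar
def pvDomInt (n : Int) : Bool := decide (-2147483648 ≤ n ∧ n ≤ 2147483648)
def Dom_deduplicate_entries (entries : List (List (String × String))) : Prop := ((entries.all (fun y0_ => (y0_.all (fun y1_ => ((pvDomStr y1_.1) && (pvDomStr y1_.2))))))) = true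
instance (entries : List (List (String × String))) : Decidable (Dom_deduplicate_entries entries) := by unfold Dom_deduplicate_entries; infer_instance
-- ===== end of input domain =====

-- B streams over enumerate(entries) once, keeping per (connector_id, mode) key a running count and
-- the current best record, instead of grouping entries into per-key lists and sorting each group.
-- Note: an inner assoc list stands for a Python dict, so duplicate keys collapse (last value, first
-- position) exactly as dict(...) does; both ports model this with PySem.Dict.ofList.

-- shared helpers: str(entry.get(k) or dflt)  (empty string and missing key are both falsy)
def pvGetOr (e : List (String × String)) (k dflt : String) : String :=
  match (PySem.Dict.ofList e).get? k with
  | some v => if v = "" then dflt else v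
  | none => dflt

-- key = (str(entry.get("connector_id") or "unknown"), str(entry.get("mode") or "real"))
def pvKey (e : List (String × String)) : String × String :=
  (pvGetOr e "connector_id" "unknown", pvGetOr e "mode" "real")

-- (record.get("started_at_utc") or "")  on an already-copied record
def pvTs (r : List (String × String)) : String :=
  match (PySem.Dict.mk r).get? "started_at_utc" with
  | some v => if v = "" then "" else v
  | none => ""

-- ===== PORT A =====
def deduplicate_entries (entries : List (List (String × String))) :
    (List (List (String × String))) × (List (String × Int)) :=
  -- grouped.setdefault(key, []).append((index, dict(entry)))
  let grouped : PySem.Dict (String × String) (List (Int × List (String × String))) :=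
    (PySem.List.enumerate entries).foldl
      (fun g ie =>
        g.modify (pvKey ie.2) [] (fun l => l ++ [(ie.1, (PySem.Dict.ofList ie.2).items)]))
      PySem.Dict.empty
  -- second loop: per group, sort by ((started_at_utc or ""), index) and take the last
  let s :=
    grouped.items.foldl
      (fun s kr =>
        if kr.2.length = 1 then (s.1 ++ [kr.2.headD (0, [])], s.2)
        else
          (s.1 ++ [PySem.List.pyGetD
                     (PySem.List.sorted2 kr.2 (fun it => pvTs it.2) (fun it => it.1)) (-1) (0, [])],
           s.2.modify kr.1.1 0 (fun v => v + (kr.2.length : Int) - 1)))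
      (([] : List (Int × List (String × String))), (PySem.Dict.empty : PySem.Dict String Int))
  -- deduped.sort(key=item[0]); return ([entry for _, entry in deduped], duplicates)
  ((PySem.List.sorted s.1 (fun it => it.1)).map (fun it => it.2), s.2.items)

-- B helper: merge one entry into the running (count, index, ts, record) state of its key
def pvUpd (cur : Option (Int × Int × String × List (String × String))) (i : Int) (ts : String)
    (r : List (String × String)) : Int × Int × String × List (String × String) :=
  match cur with
  | none => (1, i, ts, r)
  | some v => if v.2.2.1 ≤ ts then (v.1 + 1, i, ts, r) else (v.1 + 1, v.2.1, v.2.2.1, v.2.2.2)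

-- ===== PORT B =====
def deduplicate_entries_alt (entries : List (List (String × String))) :
    (List (List (String × String))) × (List (String × Int)) :=
  -- one pass: best[key] = (count, index, ts, record); replace best when ts >= best ts
  let best : PySem.Dict (String × String) (Int × Int × String × List (String × String)) :=
    (PySem.List.enumerate entries).foldl
      (fun b ie =>
        b.insert (pvKey ie.2)
          (pvUpd (b.get? (pvKey ie.2)) ie.1 (pvGetOr ie.2 "started_at_utc" "")
            (PySem.Dict.ofList ie.2).items))
      PySem.Dict.empty
  -- collect counts and chosen (index, record) pairs, then one final sort by index
  let s :=
    best.items.foldl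
      (fun s kv =>
        ((if 1 < kv.2.1 then s.1.modify kv.1.1 0 (fun v => v + kv.2.1 - 1) else s.1),
         s.2 ++ [(kv.2.2.1, kv.2.2.2.2)]))
      ((PySem.Dict.empty : PySem.Dict String Int), ([] : List (Int × List (String × String))))
  ((PySem.List.sorted s.2 (fun it => it.1)).map (fun it => it.2), s.1.items)

-- ===== PRECONDITION & SPEC =====
def Spec_deduplicate_entries (entries : List (List (String × String))) (out : (List (List (String × String))) × (List (String × Int))) : Prop := out = deduplicate_entries_alt entries
instance (entries : List (List (String × String))) (out : (List (List (String × String))) × (List (String × Int))) : Decidable (Spec_deduplicate_entries entries out) := by unfold Spec_deduplicate_entries; infer_instance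

-- ===== CLAIM (what is proved, stated in full; the proofs are below) =====
def Claim_equal_deduplicate_entries : Prop := ∀ (entries : List (List (String × String))), Dom_deduplicate_entries entries → Spec_deduplicate_entries entries (deduplicate_entries entries)

-- ===== LEMMAS AND PROOFS =====

-- payload stored per entry: (index, dict(entry))
def pvPay (x : Int × List (String × String)) : Int × List (String × String) :=
  (x.1, (PySem.Dict.ofList x.2).items)

-- Python's lexicographic "<" on the sort key ((ts, index)) as sorted2 uses it
def pvLt (a b : Int × List (String × String)) : Bool :=
  decide (pvTs a.2 < pvTs b.2) || (!decide (pvTs b.2 < pvTs a.2) && decide (a.1 < b.1))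

-- streaming state: (count, index, ts, record)
def pvVstp (v : Int × Int × String × List (String × String))
    (p : Int × List (String × String)) : Int × Int × String × List (String × String) :=
  pvUpd (some v) p.1 (pvTs p.2) p.2

lemma pvGetOr_ts (e : List (String × String)) :
    pvGetOr e "started_at_utc" "" = pvTs (PySem.Dict.ofList e).items := by
  unfold pvGetOr pvTs
  cases h : (PySem.Dict.ofList e).get? "started_at_utc" with
  | none => rfl
  | some v => rfl

lemma pvEnum_fst_ge {α : Type} (xs : List α) (s : Int) :
    ∀ p ∈ PySem.List.enumerate xs s, s ≤ p.1 := by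
  induction xs generalizing s with
  | nil => intro p hp; exact absurd hp (by simp [show PySem.List.enumerate ([] : List α) s = [] from rfl])
  | cons x t ih =>
      intro p hp
      rw [show PySem.List.enumerate (x :: t) s = (s, x) :: PySem.List.enumerate t (s + 1) from rfl] at hp
      rcases List.mem_cons.1 hp with h | h
      · simp [h]
      · have := ih (s + 1) p h; omega

lemma pvEnum_pairwise {α : Type} (xs : List α) (s : Int) :
    (PySem.List.enumerate xs s).Pairwise (fun a b => a.1 < b.1) := by
  induction xs generalizing s with
  | nil => exact List.Pairwise.nil
  | cons x t ih =>
      rw [show PySem.List.enumerate (x :: t) s = (s, x) :: PySem.List.enumerate t (s + 1) from rfl]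
      refine List.Pairwise.cons ?_ (ih (s + 1))
      intro p hp
      have := pvEnum_fst_ge t (s + 1) p hp
      omega

-- get? after a keyed insert loop = streaming fold over the key's own entries
lemma pvGet_foldl_insert_key {κ ν β : Type} [BEq κ] [LawfulBEq κ]
    (l : List β) (key : β → κ) (f : Option ν → β → ν) (d : PySem.Dict κ ν) (k : κ) :
    (l.foldl (fun d x => d.insert (key x) (f (d.get? (key x)) x)) d).get? k
      = (l.filter (fun x => key x == k)).foldl
          (fun acc x => some (f acc x)) (d.get? k) := by
  induction l generalizing d with
  | nil => rfl
  | cons x t ih =>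
      simp only [List.foldl_cons, List.filter_cons]
      by_cases hk : key x = k
      · subst hk
        simp only [beq_self_eq_true, if_pos, List.foldl_cons]
        rw [ih, PySem.Dict.get?_insert_self]
      · have hbe : (key x == k) = false := by simp [hk]
        simp only [hbe, Bool.false_eq_true, if_neg, not_false_iff]
        rw [ih, PySem.Dict.get?_insert_of_ne _ _ (fun h => hk h.symm)]

-- a some-seeded option fold is a plain fold
lemma pvFoldl_some {ν β : Type} (f : Option ν → β → ν) (l : List β) (v : ν) :
    l.foldl (fun acc x => some (f acc x)) (some v)
      = some (l.foldl (fun v x => f (some v) x) v) := by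
  induction l generalizing v with
  | nil => rfl
  | cons x t ih => simp only [List.foldl_cons]; exact ih (f (some v) x)

-- inserting an element that sorts before the last keeps the last
lemma pvGetLast?_insertBy {α : Type} (before : α → α → Bool) (x : α) :
    ∀ (acc : List α) (m : α), acc.getLast? = some m → before x m = true →
      (PySem.List.insertBy before x acc).getLast? = some m := by
  intro acc
  induction acc with
  | nil => intro m h; simp at h
  | cons y ys ih =>
      intro m hm hx
      have unf : PySem.List.insertBy before x (y :: ys)
          = if before x y then x :: y :: ys else y :: PySem.List.insertBy before x ys := rfl
      cases hys : ys with
      | nil =>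
          rw [hys] at hm unf
          simp only [List.getLast?_singleton, Option.some.injEq] at hm
          subst hm
          rw [unf, if_pos hx]
          rfl
      | cons z zs =>
          rw [hys] at hm ih unf
          rw [List.getLast?_cons_cons] at hm
          by_cases hb : before x y = true
          · rw [unf, if_pos hb, List.getLast?_cons_cons, List.getLast?_cons_cons, hm]
          · rw [unf, if_neg (by simpa using hb)]
            have h2 := ih m hm hx
            cases hins : PySem.List.insertBy before x (z :: zs) with
            | nil =>
                exfalso
                have : x ∈ PySem.List.insertBy before x (z :: zs) :=
                  (PySem.List.mem_insertBy _ _ _ _).2 (Or.inl rfl)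
                rw [hins] at this; simp at this
            | cons a as =>
                rw [hins] at h2
                rw [List.getLast?_cons_cons]
                exact h2

-- core invariant: fold of insertBy keeps its last = the streaming best, and counts length
lemma pvCore (rest : List (Int × List (String × String))) :
    ∀ (acc : List (Int × List (String × String))) (m : Int × List (String × String)) (c : Int),
      acc.getLast? = some m →
      (∀ y ∈ acc, pvTs y.2 ≤ pvTs m.2) →
      (∀ x ∈ rest, ∀ y ∈ acc, y.1 < x.1) →
      rest.Pairwise (fun a b => a.1 < b.1) →
      ∃ m', (rest.foldl (fun a x => PySem.List.insertBy pvLt x a) acc).getLast? = some m' ∧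
        rest.foldl pvVstp (c, m.1, pvTs m.2, m.2) = (c + rest.length, m'.1, pvTs m'.2, m'.2) := by
  induction rest with
  | nil =>
      intro acc m c hlast _ _ _
      exact ⟨m, hlast, by simp⟩
  | cons x t ih =>
      intro acc m c hlast hmax hidx hpw
      simp only [List.foldl_cons]
      by_cases hts : pvTs m.2 ≤ pvTs x.2
      · -- x becomes the new last (and the new streaming best)
        have hnb : ∀ y ∈ acc, pvLt x y = false := by
          intro y hy
          have h1 : ¬ pvTs x.2 < pvTs y.2 := fun h =>
            absurd (lt_of_le_of_lt hts h) (not_lt.2 (hmax y hy))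
          have h2 : ¬ x.1 < y.1 := by
            have := hidx x List.mem_cons_self y hy; omega
          unfold pvLt
          rw [decide_eq_false h1, decide_eq_false h2]
          simp
        rw [PySem.List.insertBy_of_forall_not_before _ _ _ hnb]
        have hstep : pvVstp (c, m.1, pvTs m.2, m.2) x = (c + 1, x.1, pvTs x.2, x.2) := by
          simp only [pvVstp, pvUpd]
          rw [if_pos hts]
        rw [hstep]
        have hres := ih (acc ++ [x]) x (c + 1)
          (by simp)
          (by intro y hy
              rcases List.mem_append.1 hy with h | h
              · exact le_trans (hmax y h) hts
              · simp at h; simp [h])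
          (by intro z hz y hy
              rcases List.mem_append.1 hy with h | h
              · exact hidx z (List.mem_cons_of_mem _ hz) y h
              · simp at h; subst h
                exact (List.pairwise_cons.1 hpw).1 z hz)
          ((List.pairwise_cons.1 hpw).2)
        obtain ⟨m', h1, h2⟩ := hres
        refine ⟨m', h1, ?_⟩
        have hlen : c + 1 + (t.length : Int) = c + ((x :: t).length : Int) := by
          push_cast [List.length_cons]; ring
        rw [h2, hlen]
      · -- x sorts strictly before m: last and streaming best unchanged
        have hlt : pvLt x m = true := by
          have h : pvTs x.2 < pvTs m.2 := lt_of_not_ge hts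
          unfold pvLt
          rw [decide_eq_true h]
          simp
        have hlast' := pvGetLast?_insertBy pvLt x acc m hlast hlt
        have hstep : pvVstp (c, m.1, pvTs m.2, m.2) x = (c + 1, m.1, pvTs m.2, m.2) := by
          simp only [pvVstp, pvUpd]
          rw [if_neg hts]
        rw [hstep]
        have hres := ih (PySem.List.insertBy pvLt x acc) m (c + 1)
          hlast'
          (by intro y hy
              rcases (PySem.List.mem_insertBy _ _ _ _).1 hy with h | h
              · subst h; exact le_of_lt (lt_of_not_ge hts)
              · exact hmax y h)
          (by intro z hz y hy
              rcases (PySem.List.mem_insertBy _ _ _ _).1 hy with h | h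
              · subst h; exact (List.pairwise_cons.1 hpw).1 z hz
              · exact hidx z (List.mem_cons_of_mem _ hz) y h)
          ((List.pairwise_cons.1 hpw).2)
        obtain ⟨m', h1, h2⟩ := hres
        refine ⟨m', h1, ?_⟩
        have hlen : c + 1 + (t.length : Int) = c + ((x :: t).length : Int) := by
          push_cast [List.length_cons]; ring
        rw [h2, hlen]

-- sorted2 with the group's keys is the insertBy-fold with pvLt
lemma pvSorted2_eq (L : List (Int × List (String × String))) :
    PySem.List.sorted2 L (fun it => pvTs it.2) (fun it => it.1)
      = L.foldl (fun a x => PySem.List.insertBy pvLt x a) [] := by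
  rfl

-- per-key summary: for a nonempty index-increasing group L,
-- the streaming fold equals (|L|, last of sorted2) componentwise
lemma pvPerKey (L : List (Int × List (String × String))) (hne : L ≠ [])
    (hpw : L.Pairwise (fun a b => a.1 < b.1)) :
    ∃ m', (PySem.List.sorted2 L (fun it => pvTs it.2) (fun it => it.1)).getLast? = some m' ∧
      L.foldl (fun acc p => some (pvUpd acc p.1 (pvTs p.2) p.2))
          none = some ((L.length : Int), m'.1, pvTs m'.2, m'.2) := by
  cases L with
  | nil => exact absurd rfl hne
  | cons x t =>
      rw [pvSorted2_eq]
      simp only [List.foldl_cons]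
      have h0 : PySem.List.insertBy pvLt x [] = [x] := rfl
      rw [h0]
      have hcore := pvCore t [x] x 1
        (by simp)
        (by simp)
        (by intro z hz y hy; simp at hy; subst hy
            exact (List.pairwise_cons.1 hpw).1 z hz)
        ((List.pairwise_cons.1 hpw).2)
      obtain ⟨m', h1, h2⟩ := hcore
      refine ⟨m', h1, ?_⟩
      have hseed : (some (pvUpd none x.1 (pvTs x.2) x.2)) = some (1, x.1, pvTs x.2, x.2) := rfl
      rw [hseed, pvFoldl_some]
      have he : (fun (v : Int × Int × String × List (String × String))
          (p : Int × List (String × String)) => pvUpd (some v) p.1 (pvTs p.2) p.2) = pvVstp := by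
        funext v p; rfl
      have hlen : (1 : Int) + (t.length : Int) = ((x :: t).length : Int) := by
        push_cast [List.length_cons]; ring
      rw [he, h2, hlen]

-- A's per-group chosen record
def pvChosen (L : List (Int × List (String × String))) : Int × List (String × String) :=
  if L.length = 1 then L.headD (0, [])
  else PySem.List.pyGetD (PySem.List.sorted2 L (fun it => pvTs it.2) (fun it => it.1)) (-1) (0, [])

lemma pvChosen_eq (L : List (Int × List (String × String))) (hne : L ≠ [])
    (m : Int × List (String × String))
    (hm : (PySem.List.sorted2 L (fun it => pvTs it.2) (fun it => it.1)).getLast? = some m) :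
    pvChosen L = m := by
  unfold pvChosen
  split
  · next hl =>
      obtain ⟨x, hx⟩ := List.length_eq_one_iff.1 hl
      subst hx
      rw [pvSorted2_eq] at hm
      simp only [List.foldl_cons, List.foldl_nil] at hm
      have : PySem.List.insertBy pvLt x [] = [x] := rfl
      rw [this] at hm
      simp at hm
      simp [hm]
  · have hsne : PySem.List.sorted2 L (fun it => pvTs it.2) (fun it => it.1) ≠ [] := by
      intro h
      have hp := PySem.List.sorted2_perm L (fun it => pvTs it.2) (fun it => it.1) false
      rw [h] at hp
      exact hne (List.Perm.nil_eq hp).symm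
    rw [PySem.List.pyGetD_neg_one _ _ hsne]
    rw [List.getLast?_eq_getLast hsne] at hm
    exact Option.some.injEq _ _ ▸ (by simpa using hm)

-- phase 2: folding A's grouped items and B's best items over the same key list
-- produces the same chosen list and the same duplicates dict (accumulators swapped)
lemma pvPhase2 (Ks : List (String × String))
    (vG : (String × String) → List (Int × List (String × String)))
    (vB : (String × String) → Int × Int × String × List (String × String))
    (h : ∀ k ∈ Ks, ∃ m', vG k ≠ [] ∧ pvChosen (vG k) = m' ∧
        vB k = (((vG k).length : Int), m'.1, pvTs m'.2, m'.2)) :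
    ∀ (dd : List (Int × List (String × String))) (dup : PySem.Dict String Int),
      ((Ks.map (fun k => (k, vG k))).foldl
        (fun s kr =>
          if kr.2.length = 1 then (s.1 ++ [kr.2.headD (0, [])], s.2)
          else
            (s.1 ++ [PySem.List.pyGetD
                       (PySem.List.sorted2 kr.2 (fun it => pvTs it.2) (fun it => it.1)) (-1) (0, [])],
             s.2.modify kr.1.1 0 (fun v => v + (kr.2.length : Int) - 1)))
        (dd, dup))
      = (((Ks.map (fun k => (k, vB k))).foldl
          (fun s kv =>
            ((if 1 < kv.2.1 then s.1.modify kv.1.1 0 (fun v => v + kv.2.1 - 1) else s.1),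
             s.2 ++ [(kv.2.2.1, kv.2.2.2.2)]))
          (dup, dd)).2,
         ((Ks.map (fun k => (k, vB k))).foldl
          (fun s kv =>
            ((if 1 < kv.2.1 then s.1.modify kv.1.1 0 (fun v => v + kv.2.1 - 1) else s.1),
             s.2 ++ [(kv.2.2.1, kv.2.2.2.2)]))
          (dup, dd)).1) := by
  induction Ks with
  | nil => intro dd dup; rfl
  | cons k Ks ih =>
      intro dd dup
      obtain ⟨m', hne, hch, hvb⟩ := h k List.mem_cons_self
      have hrest : ∀ k' ∈ Ks, ∃ m', vG k' ≠ [] ∧ pvChosen (vG k') = m' ∧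
          vB k' = (((vG k').length : Int), m'.1, pvTs m'.2, m'.2) :=
        fun k' hk' => h k' (List.mem_cons_of_mem _ hk')
      simp only [List.map_cons, List.foldl_cons]
      rw [hvb]
      have hpos : 0 < (vG k).length := List.length_pos_iff.2 hne
      by_cases hl : (vG k).length = 1
      · have hhd : (vG k).headD ((0 : Int), ([] : List (String × String))) = m' := by
          rw [← hch]; unfold pvChosen; rw [if_pos hl]
        have hc2 : ¬ (1 : Int) < ((vG k).length : Int) := by rw [hl]; omega
        rw [if_pos hl, if_neg hc2, hhd]
        exact ih hrest (dd ++ [m']) dup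
      · have hc2 : (1 : Int) < ((vG k).length : Int) := by
          have : 2 ≤ (vG k).length := by omega
          exact_mod_cast this
        have hpy : PySem.List.pyGetD
            (PySem.List.sorted2 (vG k) (fun it => pvTs it.2) (fun it => it.1)) (-1)
            ((0 : Int), ([] : List (String × String))) = m' := by
          rw [← hch]; unfold pvChosen; rw [if_neg hl]
        rw [if_neg hl, if_pos hc2, hpy]
        exact ih hrest (dd ++ [m']) (dup.modify k.1 0 (fun v => v + ((vG k).length : Int) - 1))

-- ===== main theorem =====
theorem pv_main (entries : List (List (String × String))) :
    deduplicate_entries entries = deduplicate_entries_alt entries := by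
  have e1 : deduplicate_entries entries =
      ((PySem.List.sorted
          ((List.foldl
            (fun s kr =>
              if kr.2.length = 1 then (s.1 ++ [kr.2.headD (0, [])], s.2)
              else
                (s.1 ++ [PySem.List.pyGetD
                           (PySem.List.sorted2 kr.2 (fun it => pvTs it.2) (fun it => it.1)) (-1) (0, [])],
                 s.2.modify kr.1.1 0 (fun v => v + (kr.2.length : Int) - 1)))
            (([] : List (Int × List (String × String))), (PySem.Dict.empty : PySem.Dict String Int))
            (List.foldl
              (fun g ie =>
                g.modify (pvKey ie.2) [] (fun l => l ++ [(ie.1, (PySem.Dict.ofList ie.2).items)]))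
              PySem.Dict.empty (PySem.List.enumerate entries 0)).items).1)
          (fun it => it.1)).map (fun it => it.2),
        (List.foldl
            (fun s kr =>
              if kr.2.length = 1 then (s.1 ++ [kr.2.headD (0, [])], s.2)
              else
                (s.1 ++ [PySem.List.pyGetD
                           (PySem.List.sorted2 kr.2 (fun it => pvTs it.2) (fun it => it.1)) (-1) (0, [])],
                 s.2.modify kr.1.1 0 (fun v => v + (kr.2.length : Int) - 1)))
            (([] : List (Int × List (String × String))), (PySem.Dict.empty : PySem.Dict String Int))
            (List.foldl
              (fun g ie =>
                g.modify (pvKey ie.2) [] (fun l => l ++ [(ie.1, (PySem.Dict.ofList ie.2).items)]))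
              PySem.Dict.empty (PySem.List.enumerate entries 0)).items).2.items) := rfl
  have e2 : deduplicate_entries_alt entries =
      ((PySem.List.sorted
          ((List.foldl
            (fun s kv =>
              ((if 1 < kv.2.1 then s.1.modify kv.1.1 0 (fun v => v + kv.2.1 - 1) else s.1),
               s.2 ++ [(kv.2.2.1, kv.2.2.2.2)]))
            ((PySem.Dict.empty : PySem.Dict String Int), ([] : List (Int × List (String × String))))
            (List.foldl
              (fun b ie =>
                b.insert (pvKey ie.2)
                  (pvUpd (b.get? (pvKey ie.2)) ie.1 (pvGetOr ie.2 "started_at_utc" "")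
                    (PySem.Dict.ofList ie.2).items))
              PySem.Dict.empty (PySem.List.enumerate entries 0)).items).2)
          (fun it => it.1)).map (fun it => it.2),
        (List.foldl
            (fun s kv =>
              ((if 1 < kv.2.1 then s.1.modify kv.1.1 0 (fun v => v + kv.2.1 - 1) else s.1),
               s.2 ++ [(kv.2.2.1, kv.2.2.2.2)]))
            ((PySem.Dict.empty : PySem.Dict String Int), ([] : List (Int × List (String × String))))
            (List.foldl
              (fun b ie =>
                b.insert (pvKey ie.2)
                  (pvUpd (b.get? (pvKey ie.2)) ie.1 (pvGetOr ie.2 "started_at_utc" "")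
                    (PySem.Dict.ofList ie.2).items))
              PySem.Dict.empty (PySem.List.enumerate entries 0)).items).1.items) := rfl
  rw [e1, e2]
  -- names for the two dictionaries
  set G := List.foldl
      (fun g ie =>
        g.modify (pvKey ie.2) [] (fun l => l ++ [(ie.1, (PySem.Dict.ofList ie.2).items)]))
      PySem.Dict.empty (PySem.List.enumerate entries 0) with hGdef
  set B := List.foldl
      (fun b ie =>
        b.insert (pvKey ie.2)
          (pvUpd (b.get? (pvKey ie.2)) ie.1 (pvGetOr ie.2 "started_at_utc" "")
            (PySem.Dict.ofList ie.2).items))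
      PySem.Dict.empty (PySem.List.enumerate entries 0) with hBdef
  have hGkeys : G.keys = PySem.Set.update ([] : PySem.Set (String × String))
      ((PySem.List.enumerate entries 0).map (fun ie => pvKey ie.2)) := by
    rw [hGdef]
    have := PySem.Dict.keys_foldl_modify_key (PySem.List.enumerate entries 0)
      (fun ie => pvKey ie.2) ([] : List (Int × List (String × String)))
      (fun g ie => fun l => l ++ [(ie.1, (PySem.Dict.ofList ie.2).items)]) PySem.Dict.empty
    simpa using this
  have hBkeys : B.keys = PySem.Set.update ([] : PySem.Set (String × String))
      ((PySem.List.enumerate entries 0).map (fun ie => pvKey ie.2)) := by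
    rw [hBdef]
    have := PySem.Dict.keys_foldl_insert_key (PySem.List.enumerate entries 0)
      (fun ie => pvKey ie.2)
      (fun b ie => pvUpd (b.get? (pvKey ie.2)) ie.1 (pvGetOr ie.2 "started_at_utc" "")
        (PySem.Dict.ofList ie.2).items) PySem.Dict.empty
    simpa using this
  have hGnodup : G.keys.Nodup := by
    rw [hGdef]
    exact PySem.Dict.nodup_keys_foldl_modify_key _ _ _ _ _ (by simp)
  have hBnodup : B.keys.Nodup := by
    rw [hBdef]
    exact PySem.Dict.nodup_keys_foldl_insert_key _ _ _ _ (by simp)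
  have hGget : ∀ k, G.getD k [] =
      ((PySem.List.enumerate entries 0).filter (fun ie => pvKey ie.2 == k)).map pvPay := by
    intro k
    have hG2 : G = List.foldl (fun d p => d.modify p.1 [] (fun l => l ++ [p.2]))
        PySem.Dict.empty
        ((PySem.List.enumerate entries 0).map
          (fun ie => (pvKey ie.2, (ie.1, (PySem.Dict.ofList ie.2).items)))) := by
      rw [hGdef]
      exact (List.foldl_map
        (f := fun ie => (pvKey ie.2, (ie.1, (PySem.Dict.ofList ie.2).items)))
        (g := fun d p => d.modify p.1 [] (fun l => l ++ [p.2]))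
        (l := PySem.List.enumerate entries 0) (init := PySem.Dict.empty)).symm
    rw [hG2, PySem.Dict.getD_foldl_modify_append, PySem.Dict.getD_empty,
      List.filter_map, List.map_map]
    rfl
  have hBget : ∀ k, B.get? k =
      (((PySem.List.enumerate entries 0).filter (fun ie => pvKey ie.2 == k)).map pvPay).foldl
        (fun acc p => some (pvUpd acc p.1 (pvTs p.2) p.2)) none := by
    intro k
    have h0 : B.get? k = ((PySem.List.enumerate entries 0).filter
          (fun ie => pvKey ie.2 == k)).foldl
        (fun acc ie => some (pvUpd acc ie.1 (pvGetOr ie.2 "started_at_utc" "")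
          (PySem.Dict.ofList ie.2).items)) (PySem.Dict.empty.get? k) := by
      rw [hBdef]
      exact pvGet_foldl_insert_key (PySem.List.enumerate entries 0) (fun ie => pvKey ie.2)
        (fun cur ie => pvUpd cur ie.1 (pvGetOr ie.2 "started_at_utc" "")
          (PySem.Dict.ofList ie.2).items) PySem.Dict.empty k
    rw [h0, PySem.Dict.get?_empty, List.foldl_map]
    exact PySem.List.foldl_congr_mem _ _ _ _ (fun acc ie _ => by rw [pvGetOr_ts]; rfl)
  have hperk : ∀ k ∈ G.keys, ∃ m',
      G.getD k [] ≠ [] ∧ pvChosen (G.getD k []) = m' ∧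
      B.getD k (0, 0, "", []) = (((G.getD k []).length : Int), m'.1, pvTs m'.2, m'.2) := by
    intro k hk
    have hkm : ∃ ie ∈ PySem.List.enumerate entries 0, pvKey ie.2 = k := by
      rw [hGkeys] at hk
      rcases (PySem.Set.mem_update _ _ _).1 hk with h | h
      · simp at h
      · obtain ⟨ie, hie, hkey⟩ := List.mem_map.1 h; exact ⟨ie, hie, hkey⟩
    obtain ⟨ie, hie, hkey⟩ := hkm
    have hne : ((PySem.List.enumerate entries 0).filter
        (fun ie => pvKey ie.2 == k)).map pvPay ≠ [] := by
      have hmem : pvPay ie ∈ ((PySem.List.enumerate entries 0).filter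
          (fun ie => pvKey ie.2 == k)).map pvPay :=
        List.mem_map_of_mem (List.mem_filter.2 ⟨hie, by simp [hkey]⟩)
      exact List.ne_nil_of_mem hmem
    have hpw : (((PySem.List.enumerate entries 0).filter
        (fun ie => pvKey ie.2 == k)).map pvPay).Pairwise (fun a b => a.1 < b.1) := by
      have h1 : ((PySem.List.enumerate entries 0).filter
          (fun ie => pvKey ie.2 == k)).Pairwise (fun a b => a.1 < b.1) :=
        List.Pairwise.sublist List.filter_sublist (pvEnum_pairwise entries 0)
      exact List.pairwise_map.2 h1
    obtain ⟨m', hm1, hm2⟩ := pvPerKey _ hne hpw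
    refine ⟨m', ?_, ?_, ?_⟩
    · rw [hGget k]; exact hne
    · rw [hGget k]; exact pvChosen_eq _ hne _ hm1
    · have hsome : B.get? k = some
          ((((((PySem.List.enumerate entries 0).filter
            (fun ie => pvKey ie.2 == k)).map pvPay).length : Nat) : Int),
           m'.1, pvTs m'.2, m'.2) := by
        rw [hBget k, hm2]
      rw [PySem.Dict.getD_of_get?_eq_some _ _ hsome, hGget k]
  have hGitems : G.items = G.keys.map (fun k => (k, G.getD k [])) :=
    PySem.Dict.items_eq_map_keys G hGnodup []
  have hBitems : B.items = G.keys.map (fun k => (k, B.getD k (0, 0, "", []))) := by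
    rw [PySem.Dict.items_eq_map_keys B hBnodup (0, 0, "", []), hBkeys, ← hGkeys]
  rw [hGitems, hBitems]
  rw [pvPhase2 G.keys (fun k => G.getD k []) (fun k => B.getD k (0, 0, "", [])) hperk
    ([] : List (Int × List (String × String))) PySem.Dict.empty]

-- ===== VERDICT (by name: the statement is the Claim_ definition above) =====
theorem deduplicate_entries_spec : Claim_equal_deduplicate_entries := by
  intro entries _
  unfold Spec_deduplicate_entries
  exact pv_main entries
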